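-- pv_equiv track=rewrite | github.com/cdevenney/cs410 | hw1/hw1.py | bit_vector_relevance
-- ===== SOURCE A (Python) =====
-- def simple_bit_vector(text, word):
--     text = set(text.split())
--     if word in text:
--         return 1
--     else:
--         return 0
--
-- def bit_vector_relevance(data, query):
--     query_relevance = []
--     if isinstance(query, str):
--         query = query.split()
--
--     for doc in data:
--         score = 0
--         for w in query:
--             score += simple_bit_vector(doc, w)
--         query_relevance.append((doc, score))
--
--     query_relevance.sort(key=lambda x: x[1])
--
--     top_5 = query_relevance[-5:]
--     bottom_5 = query_relevance[:5]
--
--     return top_5, bottom_5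
-- ===== SOURCE B (Python) =====
-- def bit_vector_relevance(data, query):
--     if isinstance(query, str):
--         query = query.split()
--     # one pass over the docs: precompute each doc's word set once
--     word_sets = [set(doc.split()) for doc in data]
--     # query-major scoring: sweep the score vector once per query term
--     scores = [0] * len(data)
--     for w in query:
--         scores = [v + 1 if w in s else v for s, v in zip(word_sets, scores)]
--     query_relevance = sorted(zip(data, scores), key=lambda x: x[1])
--     return query_relevance[-5:], query_relevance[:5]
-- ===== Notes on version B (the rewrite author's own statement) =====
-- stated objective: alternative
-- what changed: B precomputes each doc's word set once in a separate pass, then scores query-major by rebuilding a score vector per query term, instead of A's doc-major loop that re-splits and rebuilds each doc's set for every query term.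
import Mathlib
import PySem

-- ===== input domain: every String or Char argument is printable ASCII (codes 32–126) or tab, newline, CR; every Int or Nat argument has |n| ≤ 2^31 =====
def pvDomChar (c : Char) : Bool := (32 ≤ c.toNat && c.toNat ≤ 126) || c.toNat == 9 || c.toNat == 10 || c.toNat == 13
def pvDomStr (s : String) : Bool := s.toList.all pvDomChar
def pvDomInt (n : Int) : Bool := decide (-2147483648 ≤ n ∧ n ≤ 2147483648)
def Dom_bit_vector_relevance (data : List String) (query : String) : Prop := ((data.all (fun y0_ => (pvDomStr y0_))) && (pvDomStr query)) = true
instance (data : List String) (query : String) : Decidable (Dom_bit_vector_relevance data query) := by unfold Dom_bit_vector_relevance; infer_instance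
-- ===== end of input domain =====

-- B precomputes each doc's word set once and scores query-major over a score vector,
-- instead of A's doc-major loop re-splitting each doc for every query term.

-- ===== PORT A =====
def simple_bit_vector (text word : String) : Int :=
  if PySem.Set.contains (PySem.Set.ofList (PySem.Str.split₀ text)) word then 1 else 0

def bit_vector_relevance (data : List String) (query : String) :
    (List (String × Int)) × (List (String × Int)) :=
  let q := PySem.Str.split₀ query
  let query_relevance : List (String × Int) :=
    data.foldl (fun acc doc =>
      acc ++ [(doc, q.foldl (fun score w => score + simple_bit_vector doc w) 0)]) []
  let query_relevance := PySem.List.sorted query_relevance (fun x => x.2) false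
  let top_5 := PySem.List.slice query_relevance (some (-5)) none
  let bottom_5 := PySem.List.slice query_relevance none (some 5)
  (top_5, bottom_5)

-- ===== PORT B =====
def bit_vector_relevance_alt (data : List String) (query : String) :
    (List (String × Int)) × (List (String × Int)) :=
  let q := PySem.Str.split₀ query
  let wordSets : List (PySem.Set String) :=
    data.map (fun doc => PySem.Set.ofList (PySem.Str.split₀ doc))
  let scores : List Int :=
    q.foldl (fun sc w =>
        (wordSets.zip sc).map (fun p => if PySem.Set.contains p.1 w then p.2 + 1 else p.2))
      (List.replicate data.length 0)
  let query_relevance := PySem.List.sorted (data.zip scores) (fun x => x.2) false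
  (PySem.List.slice query_relevance (some (-5)) none,
   PySem.List.slice query_relevance none (some 5))

-- ===== PRECONDITION & SPEC =====
def Spec_bit_vector_relevance (data : List String) (query : String) (out : (List (String × Int)) × (List (String × Int))) : Prop := out = bit_vector_relevance_alt data query
instance (data : List String) (query : String) (out : (List (String × Int)) × (List (String × Int))) : Decidable (Spec_bit_vector_relevance data query out) := by unfold Spec_bit_vector_relevance; infer_instance

-- ===== CLAIM (what is proved, stated in full; the proofs are below) =====
def Claim_equal_bit_vector_relevance : Prop := ∀ (data : List String) (query : String), Dom_bit_vector_relevance data query → Spec_bit_vector_relevance data query (bit_vector_relevance data query)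

-- ===== LEMMAS AND PROOFS =====

-- zipping a list with a map of itself is a map
lemma zip_map_self {α β : Type} (l : List α) (f : α → β) :
    l.zip (l.map f) = l.map (fun x => (x, f x)) := by
  induction l with
  | nil => rfl
  | cons a t ih => simp [ih]

-- the query-major fold over the score vector equals the per-doc fold
lemma scores_fold (q : List String) (sets : List (PySem.Set String))
    (f : PySem.Set String → Int) :
    q.foldl (fun sc w =>
        (sets.zip sc).map (fun p => if PySem.Set.contains p.1 w then p.2 + 1 else p.2))
      (sets.map f)
    = sets.map (fun s =>
        q.foldl (fun acc w => acc + (if PySem.Set.contains s w then 1 else 0)) (f s)) := by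
  induction q generalizing f with
  | nil => rfl
  | cons w qt ih =>
    simp only [List.foldl_cons]
    rw [zip_map_self, List.map_map]
    have h := ih (fun s => if PySem.Set.contains s w then f s + 1 else f s)
    simp only [Function.comp_def] at h ⊢
    rw [h]
    apply List.map_congr_left
    intro s _
    congr 1
    split_ifs <;> omega

theorem bit_vector_relevance_agree (data : List String) (query : String) :
    bit_vector_relevance data query = bit_vector_relevance_alt data query := by
  unfold bit_vector_relevance bit_vector_relevance_alt
  simp only [PySem.List.foldl_append_singleton_eq_map, List.nil_append]
  have hrep : List.replicate data.length (0 : Int)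
      = (data.map (fun doc => PySem.Set.ofList (PySem.Str.split₀ doc))).map (fun _ => (0 : Int)) := by
    simp [List.map_map, Function.comp_def, List.map_const']
  rw [hrep, scores_fold, List.map_map, zip_map_self]
  simp only [Function.comp_def, simple_bit_vector]

-- ===== VERDICT (by name: the statement is the Claim_ definition above) =====
theorem bit_vector_relevance_spec : Claim_equal_bit_vector_relevance := by
  intro data query _
  exact bit_vector_relevance_agree data query
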